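-- pv_equiv track=rewrite | github.com/Bobtheotherone/Parametric-Modeling | src/formula_foundry/coupongen/gate_runner.py | compute_gate_status
-- ===== SOURCE A (Python) =====
-- from typing import Any, Literal
--
-- def compute_gate_status(tests: list[dict[str, Any]]) -> Literal["passed", "failed", "skipped", "no_tests"]:
--     """Compute overall status for a gate based on its tests.
--
--     Args:
--         tests: List of test results for a gate
--
--     Returns:
--         Gate status: "passed", "failed", "skipped", or "no_tests"
--     """
--     if not tests:
--         return "no_tests"
--
--     statuses = [t.get("status", "unknown") for t in tests]
--
--     if any(s in ("failed", "error") for s in statuses):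
--         return "failed"
--     if all(s == "skipped" for s in statuses):
--         return "skipped"
--     return "passed"
-- ===== SOURCE B (Python) =====
-- _SEVERITY = {"failed": 2, "error": 2, "skipped": 0}
--
--
-- def compute_gate_status(tests):
--     """Single pass: fold each test's status into a worst-severity rank (with early
--     exit once a failure is seen), then read the answer off the final rank."""
--     if not tests:
--         return "no_tests"
--     worst = 0
--     for t in tests:
--         r = _SEVERITY.get(t.get("status", "unknown"), 1)
--         if r > worst:
--             worst = r
--             if worst == 2:
--                 break
--     if worst == 2:
--         return "failed"
--     if worst == 0:
--         return "skipped"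
--     return "passed"
-- ===== Notes on version B (the rewrite author's own statement) =====
-- stated objective: alternative
-- what changed: Replaces the status-list plus two predicate scans (any/all) by a single fold that reduces each test to a severity rank (failed/error=2, unknown/other=1, skipped=0), keeps only the running maximum with early exit on a failure, and decodes the final rank into the status string.
import Mathlib
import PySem

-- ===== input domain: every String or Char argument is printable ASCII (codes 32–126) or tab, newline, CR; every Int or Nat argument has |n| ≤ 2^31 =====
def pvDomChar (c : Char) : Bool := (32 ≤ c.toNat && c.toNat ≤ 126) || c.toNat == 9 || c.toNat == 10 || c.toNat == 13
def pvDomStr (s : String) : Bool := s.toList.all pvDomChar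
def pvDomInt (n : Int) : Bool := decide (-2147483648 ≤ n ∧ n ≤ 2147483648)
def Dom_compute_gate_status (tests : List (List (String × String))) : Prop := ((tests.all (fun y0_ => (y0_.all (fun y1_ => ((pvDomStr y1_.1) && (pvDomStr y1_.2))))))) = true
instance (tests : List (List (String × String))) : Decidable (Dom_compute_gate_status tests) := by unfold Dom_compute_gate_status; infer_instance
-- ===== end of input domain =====

-- B replaces the status list and the two any/all scans by one severity-max fold with early exit; same values everywhere.

-- ===== PORT A =====
def compute_gate_status (tests : List (List (String × String))) : String :=
  if tests = [] then "no_tests"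
  else
    let statuses := tests.map (fun t => (PySem.Dict.mk t).getD "status" "unknown")
    if statuses.any (fun s => s == "failed" || s == "error") then "failed"
    else if statuses.all (fun s => s == "skipped") then "skipped"
    else "passed"

-- ===== PORT B =====
-- _SEVERITY.get(s, 1)
def pvSeverity (s : String) : Nat :=
  (PySem.Dict.mk [("failed", 2), ("error", 2), ("skipped", 0)]).getD s 1

-- the for-loop with its running maximum and the `break` on worst == 2
def pvWorstLoop : List (List (String × String)) → Nat → Nat
  | [], worst => worst
  | t :: rest, worst =>
    let r := pvSeverity ((PySem.Dict.mk t).getD "status" "unknown")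
    let worst' := if r > worst then r else worst
    if worst' == 2 then worst' else pvWorstLoop rest worst'

def compute_gate_status_alt (tests : List (List (String × String))) : String :=
  if tests = [] then "no_tests"
  else
    let worst := pvWorstLoop tests 0
    if worst == 2 then "failed"
    else if worst == 0 then "skipped"
    else "passed"

-- ===== PRECONDITION & SPEC =====
def Spec_compute_gate_status (tests : List (List (String × String))) (out : String) : Prop := out = compute_gate_status_alt tests
instance (tests : List (List (String × String))) (out : String) : Decidable (Spec_compute_gate_status tests out) := by unfold Spec_compute_gate_status; infer_instance

-- ===== CLAIM (what is proved, stated in full; the proofs are below) =====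
def Claim_equal_compute_gate_status : Prop := ∀ (tests : List (List (String × String))), Dom_compute_gate_status tests → Spec_compute_gate_status tests (compute_gate_status tests)

-- ===== LEMMAS AND PROOFS =====

def pvStatus (t : List (String × String)) : String := (PySem.Dict.mk t).getD "status" "unknown"

def pvMaxSev (tests : List (List (String × String))) : Nat :=
  tests.foldr (fun t acc => max (pvSeverity (pvStatus t)) acc) 0

theorem pvSeverity_failed : pvSeverity "failed" = 2 := by
  simp [pvSeverity, PySem.Dict.getD, PySem.Dict.get?, PySem.Dict.mk, List.find?]

theorem pvSeverity_error : pvSeverity "error" = 2 := by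
  simp [pvSeverity, PySem.Dict.getD, PySem.Dict.get?, PySem.Dict.mk, List.find?]

theorem pvSeverity_skipped : pvSeverity "skipped" = 0 := by
  simp [pvSeverity, PySem.Dict.getD, PySem.Dict.get?, PySem.Dict.mk, List.find?]

theorem pvSeverity_other (s : String) (h1 : s ≠ "failed") (h2 : s ≠ "error")
    (h3 : s ≠ "skipped") : pvSeverity s = 1 := by
  have e1 : (("failed" : String) == s) = false := beq_eq_false_iff_ne.mpr (Ne.symm h1)
  have e2 : (("error" : String) == s) = false := beq_eq_false_iff_ne.mpr (Ne.symm h2)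
  have e3 : (("skipped" : String) == s) = false := beq_eq_false_iff_ne.mpr (Ne.symm h3)
  simp [pvSeverity, PySem.Dict.getD, PySem.Dict.get?, PySem.Dict.mk, List.find?, e1, e2, e3]

theorem pvSeverity_le_two (s : String) : pvSeverity s ≤ 2 := by
  by_cases h1 : s = "failed"
  · simp [h1, pvSeverity_failed]
  · by_cases h2 : s = "error"
    · simp [h2, pvSeverity_error]
    · by_cases h3 : s = "skipped"
      · simp [h3, pvSeverity_skipped]
      · simp [pvSeverity_other s h1 h2 h3]

theorem pvMaxSev_le_two (tests : List (List (String × String))) : pvMaxSev tests ≤ 2 := by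
  induction tests with
  | nil => simp [pvMaxSev]
  | cons t rest ih =>
    simp only [pvMaxSev, List.foldr] at *
    exact max_le (pvSeverity_le_two _) ih

theorem pvWorstLoop_eq (tests : List (List (String × String))) :
    ∀ w, w ≤ 2 → pvWorstLoop tests w = max w (pvMaxSev tests) := by
  induction tests with
  | nil => intro w _; simp [pvWorstLoop, pvMaxSev]
  | cons t rest ih =>
    intro w hw
    have hr2 : pvSeverity (pvStatus t) ≤ 2 := pvSeverity_le_two _
    have hrest : pvMaxSev rest ≤ 2 := pvMaxSev_le_two rest
    have hstep : pvWorstLoop (t :: rest) w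
        = (if ((if pvSeverity (pvStatus t) > w then pvSeverity (pvStatus t) else w) == 2) = true
           then (if pvSeverity (pvStatus t) > w then pvSeverity (pvStatus t) else w)
           else pvWorstLoop rest (if pvSeverity (pvStatus t) > w then pvSeverity (pvStatus t) else w)) := rfl
    have hmax : pvMaxSev (t :: rest) = max (pvSeverity (pvStatus t)) (pvMaxSev rest) := rfl
    rw [hstep, hmax]
    have hw' : (if pvSeverity (pvStatus t) > w then pvSeverity (pvStatus t) else w)
        = max w (pvSeverity (pvStatus t)) := by split <;> omega
    rw [hw']
    by_cases h2 : max w (pvSeverity (pvStatus t)) = 2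
    · rw [if_pos (by simp [h2])]
      omega
    · rw [if_neg (by simp [h2])]
      rw [ih _ (by omega)]
      omega

theorem pvSeverity_eq_two_iff (s : String) :
    pvSeverity s = 2 ↔ (s == "failed" || s == "error") = true := by
  by_cases h1 : s = "failed"
  · simp [h1, pvSeverity_failed]
  · by_cases h2 : s = "error"
    · simp [h2, pvSeverity_error]
    · by_cases h3 : s = "skipped"
      · simp [h3, pvSeverity_skipped, h1, h2]
      · simp [pvSeverity_other s h1 h2 h3, h1, h2]

theorem pvSeverity_eq_zero_iff (s : String) :
    pvSeverity s = 0 ↔ (s == "skipped") = true := by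
  by_cases h3 : s = "skipped"
  · simp [h3, pvSeverity_skipped]
  · by_cases h1 : s = "failed"
    · simp [h1, pvSeverity_failed, h3]
    · by_cases h2 : s = "error"
      · simp [h2, pvSeverity_error, h3]
      · simp [pvSeverity_other s h1 h2 h3, h3]

theorem pvMaxSev_eq_two_iff (tests : List (List (String × String))) :
    pvMaxSev tests = 2 ↔
      (tests.map pvStatus).any (fun s => s == "failed" || s == "error") = true := by
  induction tests with
  | nil => simp [pvMaxSev]
  | cons t rest ih =>
    have hrle := pvMaxSev_le_two rest
    have htle := pvSeverity_le_two (pvStatus t)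
    simp only [pvMaxSev, List.foldr, List.map, List.any_cons] at *
    rw [Bool.or_eq_true, ← ih, ← pvSeverity_eq_two_iff]
    omega

theorem pvMaxSev_eq_zero_iff (tests : List (List (String × String))) :
    pvMaxSev tests = 0 ↔
      (tests.map pvStatus).all (fun s => s == "skipped") = true := by
  induction tests with
  | nil => simp [pvMaxSev]
  | cons t rest ih =>
    simp only [pvMaxSev, List.foldr, List.map, List.all_cons] at *
    rw [Bool.and_eq_true, ← ih, ← pvSeverity_eq_zero_iff]
    omega

-- ===== VERDICT (by name: the statement is the Claim_ definition above) =====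
theorem compute_gate_status_spec : Claim_equal_compute_gate_status := by
  intro tests _
  unfold Spec_compute_gate_status compute_gate_status compute_gate_status_alt
  by_cases h : tests = []
  · simp [h]
  · simp only [h, if_false]
    have hloop : pvWorstLoop tests 0 = pvMaxSev tests := by
      rw [pvWorstLoop_eq tests 0 (by omega)]; omega
    have hstat : tests.map (fun t => (PySem.Dict.mk t).getD "status" "unknown")
        = tests.map pvStatus := rfl
    rw [hstat, hloop]
    have hM := pvMaxSev_le_two tests
    by_cases h2 : pvMaxSev tests = 2
    · rw [if_pos ((pvMaxSev_eq_two_iff tests).mp h2)]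
      simp [h2]
    · rw [if_neg (fun hc => h2 ((pvMaxSev_eq_two_iff tests).mpr hc))]
      have : (pvMaxSev tests == 2) = false := by simp [h2]
      rw [this]
      simp only [Bool.false_eq_true, if_false]
      by_cases h0 : pvMaxSev tests = 0
      · rw [if_pos ((pvMaxSev_eq_zero_iff tests).mp h0)]
        simp [h0]
      · rw [if_neg (fun hc => h0 ((pvMaxSev_eq_zero_iff tests).mpr hc))]
        have : (pvMaxSev tests == 0) = false := by simp [h0]
        rw [this]
        simp
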